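-- pv_equiv track=rewrite | github.com/siliconflow/onediff | onediff_comfy_nodes/docs/sd3/main.py | generate_texts
-- ===== SOURCE A (Python) =====
-- def generate_texts(min_length=50, max_length=302):
--     # 50 world
--     base_text = "a female character with long, flowing hair that appears to be made of ethereal, swirling patterns resembling the Northern Lights or Aurora Borealis. The background is dominated by deep blues and purples, creating a mysterious and dramatic atmosphere. The character's face is serene, with pale skin and striking features. She"
--
--     # Additional words pool
--     additional_words = [
--         "gracefully",
--         "beautifully",
--         "elegant",
--         "radiant",
--         "mysteriously",
--         "vibrant",
--         "softly",
--         "gently",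
--         "luminescent",
--         "sparkling",
--         "delicately",
--         "glowing",
--         "brightly",
--         "shimmering",
--         "enchanting",
--         "gloriously",
--         "magnificent",
--         "majestic",
--         "fantastically",
--         "dazzlingly",
--     ]
--     for i in range(min_length, max_length):
--         idx = i % len(additional_words)
--         base_text = base_text + " " + additional_words[idx]
--         yield base_text
-- ===== SOURCE B (Python) =====
-- def generate_texts(min_length=50, max_length=302):
--     base_text = "a female character with long, flowing hair that appears to be made of ethereal, swirling patterns resembling the Northern Lights or Aurora Borealis. The background is dominated by deep blues and purples, creating a mysterious and dramatic atmosphere. The character's face is serene, with pale skin and striking features. She"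
--
--     # Additional words pool
--     additional_words = [
--         "gracefully",
--         "beautifully",
--         "elegant",
--         "radiant",
--         "mysteriously",
--         "vibrant",
--         "softly",
--         "gently",
--         "luminescent",
--         "sparkling",
--         "delicately",
--         "glowing",
--         "brightly",
--         "shimmering",
--         "enchanting",
--         "gloriously",
--         "magnificent",
--         "majestic",
--         "fantastically",
--         "dazzlingly",
--     ]
--     # Precompute the appended words once; rebuild each output from a prefix slice
--     # instead of maintaining a mutable running accumulator.
--     words = [additional_words[i % len(additional_words)] for i in range(min_length, max_length)]
--     for k in range(len(words)):
--         yield base_text + " " + " ".join(words[: k + 1])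
-- ===== Notes on version B (the rewrite author's own statement) =====
-- stated objective: alternative
-- what changed: B precomputes the list of appended words once and reconstructs each yielded string independently as base + join of a prefix slice, eliminating A's mutable running accumulator rebound across iterations.
import Mathlib
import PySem

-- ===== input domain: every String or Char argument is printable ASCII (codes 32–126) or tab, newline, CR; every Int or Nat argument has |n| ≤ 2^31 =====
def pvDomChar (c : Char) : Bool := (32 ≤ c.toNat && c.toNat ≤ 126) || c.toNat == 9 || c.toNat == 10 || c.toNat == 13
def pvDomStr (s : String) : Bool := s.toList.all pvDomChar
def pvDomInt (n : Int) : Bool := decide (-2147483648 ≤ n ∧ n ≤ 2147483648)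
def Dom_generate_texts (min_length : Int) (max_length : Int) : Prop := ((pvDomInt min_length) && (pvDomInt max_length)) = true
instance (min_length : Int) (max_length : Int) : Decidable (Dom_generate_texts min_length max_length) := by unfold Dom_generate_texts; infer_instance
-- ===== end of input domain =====

-- B rebuilds each yielded string from a prefix slice of a precomputed word list instead of A's
-- mutable running accumulator; same outputs (objective: alternative decomposition).

-- ===== PORT A =====
def pvBase : String := "a female character with long, flowing hair that appears to be made of ethereal, swirling patterns resembling the Northern Lights or Aurora Borealis. The background is dominated by deep blues and purples, creating a mysterious and dramatic atmosphere. The character's face is serene, with pale skin and striking features. She"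

def pvAdditionalWords : List String :=
  ["gracefully", "beautifully", "elegant", "radiant", "mysteriously", "vibrant", "softly",
   "gently", "luminescent", "sparkling", "delicately", "glowing", "brightly", "shimmering",
   "enchanting", "gloriously", "magnificent", "majestic", "fantastically", "dazzlingly"]

-- additional_words[i % len(additional_words)]; i % 20 is always in [0,20), so the default is never used
def pvWordAt (i : Int) : String :=
  PySem.List.pyGetD pvAdditionalWords (PySem.Int.mod i (pvAdditionalWords.length : Int)) ""

-- the generator's loop: rebind base_text, yield it
def generate_texts_go (b : String) : List Int → List String
  | [] => []
  | i :: rest =>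
      let b' := b ++ " " ++ pvWordAt i
      b' :: generate_texts_go b' rest

def generate_texts (min_length : Int) (max_length : Int) : List String :=
  generate_texts_go pvBase (PySem.List.pyRange min_length max_length 1)

-- ===== PORT B =====
def generate_texts_alt (min_length : Int) (max_length : Int) : List String :=
  let words := (PySem.List.pyRange min_length max_length 1).map pvWordAt
  (List.range words.length).map (fun k => pvBase ++ " " ++ PySem.Str.join " " (words.take (k + 1)))

-- ===== PRECONDITION & SPEC =====
def Spec_generate_texts (min_length : Int) (max_length : Int) (out : List String) : Prop := out = generate_texts_alt min_length max_length
instance (min_length : Int) (max_length : Int) (out : List String) : Decidable (Spec_generate_texts min_length max_length out) := by unfold Spec_generate_texts; infer_instance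

-- ===== CLAIM (what is proved, stated in full; the proofs are below) =====
def Claim_equal_generate_texts : Prop := ∀ (min_length : Int) (max_length : Int), Dom_generate_texts min_length max_length → Spec_generate_texts min_length max_length (generate_texts min_length max_length)

-- ===== LEMMAS AND PROOFS =====

theorem str_join_cons_of_ne_nil (w : String) (l : List String) (h : l ≠ []) :
    PySem.Str.join " " (w :: l) = w ++ " " ++ PySem.Str.join " " l := by
  cases l with
  | nil => exact absurd rfl h
  | cons x xs =>
      apply String.toList_inj.mp
      simp [PySem.Str.join, PySem.Chars.join_cons_cons]

theorem str_join_singleton (w : String) : PySem.Str.join " " [w] = w := by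
  apply String.toList_inj.mp
  simp [PySem.Str.join, PySem.Chars.join_singleton]

theorem generate_texts_go_eq (l : List Int) (b : String) :
    generate_texts_go b l =
      (List.range l.length).map
        (fun k => b ++ " " ++ PySem.Str.join " " ((l.map pvWordAt).take (k + 1))) := by
  induction l generalizing b with
  | nil => simp [generate_texts_go]
  | cons i rest ih =>
      simp only [generate_texts_go, List.length_cons, List.range_succ_eq_map,
        List.map_cons, List.map_map]
      refine List.cons_eq_cons.mpr ⟨by simp [str_join_singleton], ?_⟩
      rw [ih (b ++ " " ++ pvWordAt i)]
      apply List.map_congr_left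
      intro k _
      simp only [Function.comp, List.take_succ_cons]
      cases rest with
      | nil => simp at *
      | cons r rest' =>
          rw [str_join_cons_of_ne_nil _ _ (by simp [List.take_succ_cons])]
          simp [String.append_assoc]

theorem generate_texts_spec_aux (a b : Int) : generate_texts a b = generate_texts_alt a b := by
  unfold generate_texts generate_texts_alt
  simp only [List.length_map]
  exact generate_texts_go_eq _ _

-- ===== VERDICT (by name: the statement is the Claim_ definition above) =====
theorem generate_texts_spec : Claim_equal_generate_texts := by
  intro a b _
  unfold Spec_generate_texts
  exact generate_texts_spec_aux a b
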